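-- pv_equiv track=rewrite | github.com/valik94/PythonProblems | labs109.py | count_growlers
-- ===== SOURCE A (Python) =====
-- def count_growlers(animals):
--     growl = 0
--     for aa in [animals, [a[::-1] for a in reversed(animals)]]:
--         balance = 0
--         for a in aa:
--             if balance > 0 and (a == 'cat' or a == 'dog'):
--                 growl += 1
--             balance -= 1 if a == 'cat' or a == 'tac' else -1
--     return growl
-- ===== SOURCE B (Python) =====
-- def count_growlers(animals):
--     def val(a):
--         return -1 if a in ('cat', 'tac') else 1
--     total = sum(val(a) for a in animals)
--     left = 0
--     growl = 0
--     for a in animals: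
--         if a == 'cat' or a == 'dog':
--             if left > 0:
--                 growl += 1
--         elif a == 'tac' or a == 'god':
--             if total - left - val(a) > 0:
--                 growl += 1
--         left += val(a)
--     return growl
-- ===== Notes on version B (the rewrite author's own statement) =====
-- stated objective: alternative
-- what changed: A makes two counting passes (forward, then over the list reversed with each string reversed); B precomputes the total balance once and does a single forward pass, deriving each animal's right-side balance as total - left - val(a).
import Mathlib
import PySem

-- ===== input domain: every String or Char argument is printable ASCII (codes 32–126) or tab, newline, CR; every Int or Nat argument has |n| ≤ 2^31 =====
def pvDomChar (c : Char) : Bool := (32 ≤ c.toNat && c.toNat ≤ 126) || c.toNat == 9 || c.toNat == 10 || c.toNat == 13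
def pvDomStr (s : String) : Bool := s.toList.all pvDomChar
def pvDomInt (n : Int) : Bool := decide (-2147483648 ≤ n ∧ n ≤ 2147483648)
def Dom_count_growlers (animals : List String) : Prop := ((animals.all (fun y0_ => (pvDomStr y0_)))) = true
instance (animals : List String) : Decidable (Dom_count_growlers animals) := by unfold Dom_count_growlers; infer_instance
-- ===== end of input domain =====

-- B replaces A's two passes (forward, then over the string-reversed reversed list) by one
-- forward pass using the precomputed total balance; same cost class, simpler decomposition.

-- ===== PORT A =====
-- a[::-1] (string slice with step -1; never raises for step ≠ 0, so getD is unreachable)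
def pyrev (a : String) : String := (PySem.Str.slice? a none none (-1)).getD ""

def count_growlers (animals : List String) : Int :=
  ([animals, (animals.reverse).map (fun a => pyrev a)]).foldl
    (fun growl aa =>
      (aa.foldl (fun (s : Int × Int) a =>
        let g := if s.1 > 0 ∧ (a = "cat" ∨ a = "dog") then s.2 + 1 else s.2
        (s.1 - (if a = "cat" ∨ a = "tac" then (1 : Int) else -1), g)) ((0 : Int), growl)).2)
    0

-- ===== PORT B =====
def gval (a : String) : Int := if a = "cat" ∨ a = "tac" then -1 else 1

def count_growlers_alt (animals : List String) : Int :=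
  let total := animals.foldl (fun t a => t + gval a) 0
  (animals.foldl (fun (s : Int × Int) a =>
    let g :=
      if a = "cat" ∨ a = "dog" then (if s.1 > 0 then s.2 + 1 else s.2)
      else if a = "tac" ∨ a = "god" then (if total - s.1 - gval a > 0 then s.2 + 1 else s.2)
      else s.2
    (s.1 + gval a, g)) ((0 : Int), (0 : Int))).2

-- ===== PRECONDITION & SPEC =====
def Spec_count_growlers (animals : List String) (out : Int) : Prop := out = count_growlers_alt animals
instance (animals : List String) (out : Int) : Decidable (Spec_count_growlers animals out) := by unfold Spec_count_growlers; infer_instance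

-- ===== CLAIM (what is proved, stated in full; the proofs are below) =====
def Claim_equal_count_growlers : Prop := ∀ (animals : List String), Dom_count_growlers animals → Spec_count_growlers animals (count_growlers animals)

-- ===== LEMMAS AND PROOFS =====

-- sum of gval over a list
def sv : List String → Int
  | [] => 0
  | a :: t => gval a + sv t

-- growls counted by A's forward pass starting from balance b
def cntF : List String → Int → Int
  | [], _ => 0
  | a :: t, b => (if b > 0 ∧ (a = "cat" ∨ a = "dog") then 1 else 0) + cntF t (b + gval a)

-- growls of the backward pass, phrased on the original list: count tac/god with positive suffix balance
def cntR : List String → Int → Int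
  | [], _ => 0
  | a :: t, r => (if r + sv t > 0 ∧ (a = "tac" ∨ a = "god") then 1 else 0) + cntR t r

theorem sv_append (xs ys : List String) : sv (xs ++ ys) = sv xs + sv ys := by
  induction xs with
  | nil => simp [sv]
  | cons a t ih => simp [sv, ih]; ring

theorem pyrev_eq (a : String) : pyrev a = String.ofList a.toList.reverse := by
  simp [pyrev, PySem.Str.slice?_none_none_neg_one]

theorem pyrev_eq_iff (a : String) (w w' : String) (hw : w.toList.reverse = w'.toList) :
    pyrev a = w ↔ a = w' := by
  rw [pyrev_eq]
  constructor
  · intro h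
    have h2 := congrArg String.toList h
    simp at h2
    apply String.toList_inj.mp
    rw [← hw, ← h2, List.reverse_reverse]
  · intro h
    subst h
    apply String.toList_inj.mp
    simp [← hw]

theorem gval_pyrev (a : String) : gval (pyrev a) = gval a := by
  unfold gval
  simp only [pyrev_eq_iff a "cat" "tac" (by decide), pyrev_eq_iff a "tac" "cat" (by decide)]
  split_ifs with h1 h2 <;> first | rfl | (exfalso; tauto)

theorem sv_map_pyrev (l : List String) : sv (l.map pyrev) = sv l := by
  induction l with
  | nil => rfl
  | cons a t ih => simp [sv, ih, gval_pyrev]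

theorem sv_reverse (l : List String) : sv l.reverse = sv l := by
  induction l with
  | nil => rfl
  | cons a t ih => simp [sv, sv_append, ih]; ring

-- A's inner fold computes (b + sv l, g + cntF l b)
theorem foldA (l : List String) (b g : Int) :
    l.foldl (fun (s : Int × Int) a =>
      let g := if s.1 > 0 ∧ (a = "cat" ∨ a = "dog") then s.2 + 1 else s.2
      (s.1 - (if a = "cat" ∨ a = "tac" then (1 : Int) else -1), g)) (b, g)
    = (b + sv l, g + cntF l b) := by
  induction l generalizing b g with
  | nil => simp [sv, cntF]
  | cons a t ih =>
    simp only [List.foldl_cons, ih, sv, cntF, Prod.mk.injEq]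
    constructor
    · unfold gval; split_ifs <;> ring
    · have hb : b - (if a = "cat" ∨ a = "tac" then (1 : Int) else -1) = b + gval a := by
        unfold gval; split_ifs <;> ring
      rw [hb]
      split_ifs <;> ring

theorem cntF_append_singleton (xs : List String) (y : String) (b : Int) :
    cntF (xs ++ [y]) b = cntF xs b + (if b + sv xs > 0 ∧ (y = "cat" ∨ y = "dog") then 1 else 0) := by
  induction xs generalizing b with
  | nil => simp [cntF, sv]
  | cons a t ih =>
    simp only [List.cons_append, cntF, sv, ih]
    have : b + gval a + sv t = b + (gval a + sv t) := by ring
    rw [this]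
    ring

theorem cntF_rev (l : List String) (b : Int) :
    cntF (l.reverse.map pyrev) b = cntR l b := by
  induction l with
  | nil => rfl
  | cons a t ih =>
    simp only [List.reverse_cons, List.map_append, List.map_cons, List.map_nil]
    rw [cntF_append_singleton, ih]
    simp only [cntR, sv_map_pyrev, sv_reverse]
    simp only [pyrev_eq_iff a "cat" "tac" (by decide), pyrev_eq_iff a "dog" "god" (by decide)]
    ring

-- B's fold computes g + cntF l lft + cntR l (T - lft - sv l)
theorem foldB (T : Int) (l : List String) (lft g : Int) :
    (l.foldl (fun (s : Int × Int) a =>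
      let g :=
        if a = "cat" ∨ a = "dog" then (if s.1 > 0 then s.2 + 1 else s.2)
        else if a = "tac" ∨ a = "god" then (if T - s.1 - gval a > 0 then s.2 + 1 else s.2)
        else s.2
      (s.1 + gval a, g)) (lft, g)).2
    = g + cntF l lft + cntR l (T - lft - sv l) := by
  induction l generalizing lft g with
  | nil => simp [cntF, cntR]
  | cons a t ih =>
    simp only [List.foldl_cons, ih, cntF, cntR, sv]
    have hr : T - lft - (gval a + sv t) + sv t = T - lft - gval a := by ring
    have hr2 : T - lft - (gval a + sv t) = T - (lft + gval a) - sv t := by ring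
    simp only [hr]
    simp only [hr2]
    have hdisj : ¬ ((a = "cat" ∨ a = "dog") ∧ (a = "tac" ∨ a = "god")) := by
      rintro ⟨h1 | h1, h2 | h2⟩ <;> subst h1 <;> simp_all
    split_ifs
    all_goals try ring
    all_goals (exfalso; tauto)

theorem sv_foldl (l : List String) (t : Int) :
    l.foldl (fun t a => t + gval a) t = t + sv l := by
  induction l generalizing t with
  | nil => simp [sv]
  | cons a s ih => simp [sv, ih]; ring

-- ===== VERDICT (by name: the statement is the Claim_ definition above) =====
theorem count_growlers_spec : Claim_equal_count_growlers := by
  intro animals _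
  unfold Spec_count_growlers count_growlers count_growlers_alt
  simp only [List.foldl_cons, List.foldl_nil, foldA, sv_foldl, foldB, cntF_rev]
  ring_nf
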